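-- pv_equiv track=rewrite | github.com/johnnyflame/advent-of-code-2020 | src/day_11.py | change_cells
-- ===== SOURCE A (Python) =====
-- def change_cells(input, add, remove):
--     output = [row[:] for row in input]
--     for row, line in enumerate(input):
--         for col, _ in enumerate(line):
--             if (row, col) in add:
--                 output[row][col] = "#"
--             elif (row, col) in remove:
--                 output[row][col] = "L"
--     return output
-- ===== SOURCE B (Python) =====
-- def change_cells(input, add, remove):
--     output = [row[:] for row in input]
--     rows = len(output)
--     for (row, col) in remove:
--         if 0 <= row < rows and 0 <= col < len(output[row]):
--             output[row][col] = "L"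
--     for (row, col) in add:
--         if 0 <= row < rows and 0 <= col < len(output[row]):
--             output[row][col] = "#"
--     return output
-- ===== Notes on version B (the rewrite author's own statement) =====
-- stated objective: faster
-- what changed: Instead of scanning every grid cell and testing membership in the change sets, B iterates over the remove and add sets directly (remove first, add last so add wins as in A's elif) and writes only in-bounds coordinates.
import Mathlib
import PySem

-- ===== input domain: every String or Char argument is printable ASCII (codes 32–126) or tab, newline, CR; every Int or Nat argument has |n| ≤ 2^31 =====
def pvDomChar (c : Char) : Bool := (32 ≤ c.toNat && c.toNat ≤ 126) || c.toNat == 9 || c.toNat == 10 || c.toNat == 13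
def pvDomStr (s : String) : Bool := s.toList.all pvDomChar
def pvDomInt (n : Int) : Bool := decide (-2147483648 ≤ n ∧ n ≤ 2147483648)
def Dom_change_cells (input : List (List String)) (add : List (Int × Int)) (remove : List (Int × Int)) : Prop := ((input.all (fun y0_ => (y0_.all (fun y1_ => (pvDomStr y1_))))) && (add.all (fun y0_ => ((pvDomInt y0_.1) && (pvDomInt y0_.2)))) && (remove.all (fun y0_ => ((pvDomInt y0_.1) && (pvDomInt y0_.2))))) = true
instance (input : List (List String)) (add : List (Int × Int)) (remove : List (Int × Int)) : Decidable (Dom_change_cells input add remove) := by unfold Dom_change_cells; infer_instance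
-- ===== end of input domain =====

-- B applies the remove/add change sets directly (in-bounds writes only, add last) instead of
-- scanning every grid cell and testing set membership: objective "faster".

-- ===== PORT A =====
-- Literal transliteration of A: copy the grid, then for every (row, col) of the grid set the
-- cell to "#" if in add, else to "L" if in remove.  enumerate indices are nonnegative, so
-- `.toNat` on them is exact (Python's output[row][col] = v at these in-range indices).
def change_cells (input : List (List String)) (add : List (Int × Int)) (remove : List (Int × Int)) : List (List String) :=
  let output := input.map (fun row => row)
  (PySem.List.enumerate input).foldl (fun output rl =>
    (PySem.List.enumerate rl.2).foldl (fun output cp =>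
      if (rl.1, cp.1) ∈ add then
        output.modify rl.1.toNat (fun line => line.set cp.1.toNat "#")
      else if (rl.1, cp.1) ∈ remove then
        output.modify rl.1.toNat (fun line => line.set cp.1.toNat "L")
      else output) output) output

-- ===== PORT B =====
-- output[row][col] = v guarded by 0 <= row < len(output) and 0 <= col < len(output[row])
def pvWriteCell (output : List (List String)) (row col : Int) (v : String) : List (List String) :=
  if 0 ≤ row ∧ row < output.length ∧ 0 ≤ col ∧ col < (output.getD row.toNat []).length then
    output.modify row.toNat (fun line => line.set col.toNat v)
  else output

def change_cells_alt (input : List (List String)) (add : List (Int × Int)) (remove : List (Int × Int)) : List (List String) :=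
  let output := input.map (fun row => row)
  let output := remove.foldl (fun o rc => pvWriteCell o rc.1 rc.2 "L") output
  add.foldl (fun o rc => pvWriteCell o rc.1 rc.2 "#") output

-- ===== PRECONDITION & SPEC =====
def Spec_change_cells (input : List (List String)) (add : List (Int × Int)) (remove : List (Int × Int)) (out : List (List String)) : Prop := out = change_cells_alt input add remove
instance (input : List (List String)) (add : List (Int × Int)) (remove : List (Int × Int)) (out : List (List String)) : Decidable (Spec_change_cells input add remove out) := by unfold Spec_change_cells; infer_instance

-- ===== CLAIM (what is proved, stated in full; the proofs are below) =====
def Claim_equal_change_cells : Prop := ∀ (input : List (List String)) (add : List (Int × Int)) (remove : List (Int × Int)), Dom_change_cells input add remove → Spec_change_cells input add remove (change_cells input add remove)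

-- ===== LEMMAS AND PROOFS =====

-- cell read used by the proofs: grid[r][c] as an option
def pvCell? (g : List (List String)) (r c : Nat) : Option String :=
  g[r]?.bind (fun row => row[c]?)

-- shape = the list of row lengths; writes never change it
lemma pvShape_ms (g : List (List String)) (i j : Nat) (v : String) :
    (g.modify i (fun l => l.set j v)).map List.length = g.map List.length := by
  apply List.ext_getElem?
  intro n
  simp only [List.getElem?_map, List.getElem?_modify]
  cases g[n]? with
  | none => rfl
  | some row =>
    show Option.map List.length (some (if i = n then row.set j v else row)) = some row.length
    split <;> simp [List.length_set]

lemma pvLen_of_shape {g h : List (List String)}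
    (hs : g.map List.length = h.map List.length) : g.length = h.length := by
  simpa using congrArg List.length hs

lemma pvRowLen_of_shape {g h : List (List String)}
    (hs : g.map List.length = h.map List.length) (r : Nat) :
    (g.getD r []).length = (h.getD r []).length := by
  have h1 := congrArg (fun l => l[r]?) hs
  simp only [List.getElem?_map] at h1
  rw [List.getD_eq_getElem?_getD, List.getD_eq_getElem?_getD]
  cases hg : g[r]? <;> cases hh : h[r]? <;> simp [hg, hh] at h1 ⊢ <;> omega

lemma pvCell?_ms_hit (g : List (List String)) (r c : Nat) (v : String)
    (hr : r < g.length) (hc : c < (g.getD r []).length) :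
    pvCell? (g.modify r (fun l => l.set c v)) r c = some v := by
  have hg : g[r]? = some g[r] := List.getElem?_eq_getElem hr
  have hd : g.getD r [] = g[r] := by
    rw [List.getD_eq_getElem?_getD, hg]; rfl
  have hc' : c < (g[r]).length := by rw [hd] at hc; exact hc
  simp [pvCell?, List.getElem?_modify, hg, List.getElem?_set, hc']

lemma pvCell?_ms_miss (g : List (List String)) (i j r c : Nat) (v : String)
    (h : ¬(i = r ∧ j = c)) :
    pvCell? (g.modify i (fun l => l.set j v)) r c = pvCell? g r c := by
  by_cases hi : i = r
  · subst hi
    have hj : j ≠ c := by tauto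
    simp [pvCell?, List.getElem?_modify]
    cases g[i]? <;> simp [List.getElem?_set, hj]
  · simp [pvCell?, List.getElem?_modify, hi]

-- grid extensionality: same shape + same in-range cells → equal
lemma pvGridExt (g h : List (List String))
    (hs : g.map List.length = h.map List.length)
    (hcell : ∀ r c, r < g.length → c < (g.getD r []).length → pvCell? g r c = pvCell? h r c) :
    g = h := by
  have hlen := pvLen_of_shape hs
  apply List.ext_getElem?
  intro r
  by_cases hr : r < g.length
  · have hg : g[r]? = some g[r] := List.getElem?_eq_getElem hr
    have hh : h[r]? = some h[r] := List.getElem?_eq_getElem (by omega)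
    rw [hg, hh]
    congr 1
    have hdg : g.getD r [] = g[r] := by rw [List.getD_eq_getElem?_getD, hg]; rfl
    have hdh : h.getD r [] = h[r] := by rw [List.getD_eq_getElem?_getD, hh]; rfl
    have hrl : (g[r]).length = (h[r]).length := by
      have := pvRowLen_of_shape hs r; rw [hdg, hdh] at this; exact this
    apply List.ext_getElem?
    intro c
    by_cases hc : c < (g[r]).length
    · have := hcell r c hr (by rw [hdg]; exact hc)
      simpa [pvCell?, hg, hh] using this
    · rw [List.getElem?_eq_none (by omega), List.getElem?_eq_none (by omega)]
  · rw [List.getElem?_eq_none (by omega), List.getElem?_eq_none (by omega)]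

-- ---- B side ----
lemma pvShape_write (g : List (List String)) (p : Int × Int) (v : String) :
    (pvWriteCell g p.1 p.2 v).map List.length = g.map List.length := by
  unfold pvWriteCell
  split
  · exact pvShape_ms _ _ _ _
  · rfl

lemma pvShape_foldB (ops : List (Int × Int)) (v : String) (g : List (List String)) :
    (ops.foldl (fun o rc => pvWriteCell o rc.1 rc.2 v) g).map List.length = g.map List.length := by
  induction ops generalizing g with
  | nil => rfl
  | cons p ops ih => rw [List.foldl_cons, ih, pvShape_write]

lemma pvCell?_write (g : List (List String)) (p : Int × Int) (v : String) (r c : Nat)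
    (hr : r < g.length) (hc : c < (g.getD r []).length) :
    pvCell? (pvWriteCell g p.1 p.2 v) r c =
      if p = ((r : Int), (c : Int)) then some v else pvCell? g r c := by
  by_cases hp : p = ((r : Int), (c : Int))
  · rw [if_pos hp]
    unfold pvWriteCell
    have hp1 : p.1 = (r : Int) := by rw [hp]
    have hp2 : p.2 = (c : Int) := by rw [hp]
    rw [hp1, hp2]
    have htn : ((r : Int)).toNat = r := Int.toNat_natCast r
    have htc : ((c : Int)).toNat = c := Int.toNat_natCast c
    rw [if_pos ⟨by omega, by exact_mod_cast hr, by omega, by rw [htn]; exact_mod_cast hc⟩]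
    rw [htn, htc]
    exact pvCell?_ms_hit g r c v hr hc
  · rw [if_neg hp]
    unfold pvWriteCell
    split
    · rename_i hcond
      apply pvCell?_ms_miss
      rintro ⟨h1, h2⟩
      apply hp
      obtain ⟨c1, c2, c3, c4⟩ := hcond
      have e1 : p.1 = (r : Int) := by omega
      have e2 : p.2 = (c : Int) := by omega
      exact Prod.ext e1 e2
    · rfl

lemma pvFoldB_cell (ops : List (Int × Int)) (v : String) (g : List (List String)) (r c : Nat)
    (hr : r < g.length) (hc : c < (g.getD r []).length) :
    pvCell? (ops.foldl (fun o rc => pvWriteCell o rc.1 rc.2 v) g) r c =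
      if ((r : Int), (c : Int)) ∈ ops then some v else pvCell? g r c := by
  induction ops generalizing g with
  | nil => simp
  | cons p ops ih =>
    rw [List.foldl_cons]
    have hshape := pvShape_write g p v
    have hr' : r < (pvWriteCell g p.1 p.2 v).length := by rw [pvLen_of_shape hshape]; exact hr
    have hc' : c < ((pvWriteCell g p.1 p.2 v).getD r []).length := by
      rw [pvRowLen_of_shape hshape]; exact hc
    rw [ih _ hr' hc', pvCell?_write g p v r c hr hc]
    by_cases hin : ((r : Int), (c : Int)) ∈ ops
    · simp [hin]
    · by_cases hpe : p = ((r : Int), (c : Int)) <;> simp [hin, hpe, List.mem_cons] <;> tauto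

-- ---- A side ----
-- the inner-loop body of A, named for the proofs (definitionaly equal to the lambda in the port)
def pvStepA (add remove : List (Int × Int)) (ρ γ : Int) (g : List (List String)) : List (List String) :=
  if (ρ, γ) ∈ add then g.modify ρ.toNat (fun line => line.set γ.toNat "#")
  else if (ρ, γ) ∈ remove then g.modify ρ.toNat (fun line => line.set γ.toNat "L")
  else g

lemma pvShape_stepA (add remove : List (Int × Int)) (ρ γ : Int) (g : List (List String)) :
    (pvStepA add remove ρ γ g).map List.length = g.map List.length := by
  unfold pvStepA
  split
  · exact pvShape_ms _ _ _ _
  · split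
    · exact pvShape_ms _ _ _ _
    · rfl

lemma pvCell?_stepA_hit (add remove : List (Int × Int)) (ρ γ : Int) (g : List (List String))
    (r c : Nat) (hr : r < g.length) (hc : c < (g.getD r []).length)
    (hρ : ρ = (r : Int)) (hγ : γ = (c : Int)) :
    pvCell? (pvStepA add remove ρ γ g) r c =
      (if (ρ, γ) ∈ add then some "#" else if (ρ, γ) ∈ remove then some "L" else pvCell? g r c) := by
  subst hρ; subst hγ
  unfold pvStepA
  split
  · simpa using pvCell?_ms_hit g r c "#" hr hc
  · split
    · simpa using pvCell?_ms_hit g r c "L" hr hc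
    · rfl

lemma pvCell?_stepA_miss (add remove : List (Int × Int)) (ρ γ : Int) (g : List (List String))
    (r c : Nat) (hρ : 0 ≤ ρ) (hγ : 0 ≤ γ) (h : ¬(ρ = (r : Int) ∧ γ = (c : Int))) :
    pvCell? (pvStepA add remove ρ γ g) r c = pvCell? g r c := by
  have hmiss : ¬(ρ.toNat = r ∧ γ.toNat = c) := by
    rintro ⟨h1, h2⟩; apply h; omega
  unfold pvStepA
  split
  · exact pvCell?_ms_miss g _ _ r c "#" hmiss
  · split
    · exact pvCell?_ms_miss g _ _ r c "L" hmiss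
    · rfl

-- A's inner loop over one line, with row index ρ and enumerate start s
lemma pvInnerA_shape (add remove : List (Int × Int)) (ρ : Int) (line : List String) (s : Int)
    (g : List (List String)) :
    ((PySem.List.enumerate line s).foldl (fun o cp => pvStepA add remove ρ cp.1 o) g).map List.length
      = g.map List.length := by
  induction line generalizing s g with
  | nil => rfl
  | cons x xs ih =>
    rw [PySem.List.enumerate_cons, List.foldl_cons, ih, pvShape_stepA]

lemma pvInnerA_cell (add remove : List (Int × Int)) (ρ : Int) (line : List String) (s : Int)
    (hs : 0 ≤ s) (hρ : 0 ≤ ρ) (g : List (List String)) (r c : Nat)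
    (hr : r < g.length) (hc : c < (g.getD r []).length) :
    pvCell? ((PySem.List.enumerate line s).foldl (fun o cp => pvStepA add remove ρ cp.1 o) g) r c
      = if ρ = (r : Int) ∧ s ≤ (c : Int) ∧ (c : Int) < s + line.length then
          (if (ρ, (c : Int)) ∈ add then some "#"
           else if (ρ, (c : Int)) ∈ remove then some "L" else pvCell? g r c)
        else pvCell? g r c := by
  induction line generalizing s g with
  | nil =>
    rw [PySem.List.enumerate_nil, List.foldl_nil,
      if_neg (by rintro ⟨-, h2, h3⟩; simp at h3; omega)]
  | cons x xs ih =>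
    rw [PySem.List.enumerate_cons, List.foldl_cons]
    have hshape := pvShape_stepA add remove ρ s g
    have hr' : r < (pvStepA add remove ρ s g).length := by rw [pvLen_of_shape hshape]; exact hr
    have hc' : c < ((pvStepA add remove ρ s g).getD r []).length := by
      rw [pvRowLen_of_shape hshape]; exact hc
    rw [ih (s + 1) (by omega) _ hr' hc']
    by_cases hhit : ρ = (r : Int) ∧ s = (c : Int)
    · obtain ⟨h1, h2⟩ := hhit
      rw [if_neg (by rintro ⟨-, hx, -⟩; omega)]
      rw [pvCell?_stepA_hit add remove ρ s g r c hr hc h1 h2]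
      have hcond : ρ = (r : Int) ∧ s ≤ (c : Int) ∧ (c : Int) < s + ((x :: xs).length : Int) :=
        ⟨h1, by omega, by push_cast [List.length_cons]; omega⟩
      rw [if_pos hcond, h2]
    · have hmiss : ¬(ρ = (r : Int) ∧ s = (c : Int)) := hhit
      rw [pvCell?_stepA_miss add remove ρ s g r c hρ hs hmiss]
      by_cases hP : ρ = (r : Int) ∧ s + 1 ≤ (c : Int) ∧ (c : Int) < s + 1 + ((xs.length : Nat) : Int)
      · have hQ : ρ = (r : Int) ∧ s ≤ (c : Int) ∧ (c : Int) < s + ((x :: xs).length : Int) := by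
          obtain ⟨a, b, d⟩ := hP
          exact ⟨a, by omega, by push_cast [List.length_cons]; omega⟩
        rw [if_pos hP, if_pos hQ]
      · have hQ : ¬(ρ = (r : Int) ∧ s ≤ (c : Int) ∧ (c : Int) < s + ((x :: xs).length : Int)) := by
          rintro ⟨a, b, d⟩
          apply hP
          have hne : s ≠ (c : Int) := fun hsc => hmiss ⟨a, hsc⟩
          push_cast [List.length_cons] at d
          exact ⟨a, by omega, by omega⟩
        rw [if_neg hP, if_neg hQ]

-- A's outer loop over the rows, enumerate start s
lemma pvOuterA_cell (add remove : List (Int × Int)) (rows : List (List String)) (s : Int)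
    (hs : 0 ≤ s) (g : List (List String)) (r c : Nat)
    (hr : r < g.length) (hc : c < (g.getD r []).length) :
    pvCell? ((PySem.List.enumerate rows s).foldl
        (fun o rl => (PySem.List.enumerate rl.2).foldl (fun o' cp => pvStepA add remove rl.1 cp.1 o') o) g) r c
      = if s ≤ (r : Int) ∧ (r : Int) < s + rows.length ∧
            (c : Int) < ((rows.getD ((r : Int) - s).toNat []).length : Int) then
          (if ((r : Int), (c : Int)) ∈ add then some "#"
           else if ((r : Int), (c : Int)) ∈ remove then some "L" else pvCell? g r c)
        else pvCell? g r c := by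
  induction rows generalizing s g with
  | nil =>
    rw [PySem.List.enumerate_nil, List.foldl_nil,
      if_neg (by rintro ⟨-, -, h3⟩; simp [List.getD] at h3; omega)]
  | cons x xs ih =>
    rw [PySem.List.enumerate_cons, List.foldl_cons]
    have hshape := pvInnerA_shape add remove s x 0 g
    have hr' : r < ((PySem.List.enumerate x).foldl (fun o' cp => pvStepA add remove s cp.1 o') g).length := by
      rw [pvLen_of_shape hshape]; exact hr
    have hc' : c < (((PySem.List.enumerate x).foldl (fun o' cp => pvStepA add remove s cp.1 o') g).getD r []).length := by
      rw [pvRowLen_of_shape hshape]; exact hc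
    rw [ih (s + 1) (by omega) _ hr' hc']
    rw [pvInnerA_cell add remove s x 0 (le_refl 0) hs g r c hr hc]
    by_cases h1 : s = (r : Int)
    · have hIHn : ¬(s + 1 ≤ (r : Int) ∧ (r : Int) < s + 1 + ((xs.length : Nat) : Int) ∧
          (c : Int) < ((xs.getD ((r : Int) - (s + 1)).toNat []).length : Int)) := by
        rintro ⟨a, -, -⟩; omega
      rw [if_neg hIHn]
      have hidx : ((r : Int) - s).toNat = 0 := by omega
      by_cases h2 : (c : Int) < ((x.length : Nat) : Int)
      · have hInner : s = (r : Int) ∧ (0 : Int) ≤ (c : Int) ∧ (c : Int) < 0 + ((x.length : Nat) : Int) :=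
          ⟨h1, by omega, by omega⟩
        rw [if_pos hInner]
        have hGoal : s ≤ (r : Int) ∧ (r : Int) < s + (((x :: xs).length : Nat) : Int) ∧
            (c : Int) < ((((x :: xs).getD ((r : Int) - s).toNat []).length : Nat) : Int) := by
          refine ⟨by omega, by push_cast [List.length_cons]; omega, ?_⟩
          rw [hidx]
          simpa using h2
        rw [if_pos hGoal, h1]
      · have hInner : ¬(s = (r : Int) ∧ (0 : Int) ≤ (c : Int) ∧ (c : Int) < 0 + ((x.length : Nat) : Int)) := by
          rintro ⟨-, -, d⟩; omega
        rw [if_neg hInner]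
        have hGoal : ¬(s ≤ (r : Int) ∧ (r : Int) < s + (((x :: xs).length : Nat) : Int) ∧
            (c : Int) < ((((x :: xs).getD ((r : Int) - s).toNat []).length : Nat) : Int)) := by
          rintro ⟨-, -, d⟩
          rw [hidx] at d
          simp at d
          omega
        rw [if_neg hGoal]
    · have hInner : ¬(s = (r : Int) ∧ (0 : Int) ≤ (c : Int) ∧ (c : Int) < 0 + ((x.length : Nat) : Int)) := by
        rintro ⟨a, -, -⟩; exact h1 a
      rw [if_neg hInner]
      by_cases hP : s + 1 ≤ (r : Int) ∧ (r : Int) < s + 1 + ((xs.length : Nat) : Int) ∧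
          (c : Int) < ((xs.getD ((r : Int) - (s + 1)).toNat []).length : Int)
      · have hidx : ((r : Int) - s).toNat = ((r : Int) - (s + 1)).toNat + 1 := by omega
        have hQ : s ≤ (r : Int) ∧ (r : Int) < s + (((x :: xs).length : Nat) : Int) ∧
            (c : Int) < ((((x :: xs).getD ((r : Int) - s).toNat []).length : Nat) : Int) := by
          refine ⟨by omega, by push_cast [List.length_cons]; omega, ?_⟩
          rw [hidx, List.getD_cons_succ]
          exact hP.2.2
        rw [if_pos hP, if_pos hQ]
      · have hQ : ¬(s ≤ (r : Int) ∧ (r : Int) < s + (((x :: xs).length : Nat) : Int) ∧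
            (c : Int) < ((((x :: xs).getD ((r : Int) - s).toNat []).length : Nat) : Int)) := by
          rintro ⟨a, b, d⟩
          apply hP
          have ha1 : s + 1 ≤ (r : Int) := by
            rcases lt_or_eq_of_le a with h | h
            · omega
            · exact absurd h h1
          have hidx : ((r : Int) - s).toNat = ((r : Int) - (s + 1)).toNat + 1 := by omega
          rw [hidx, List.getD_cons_succ] at d
          push_cast [List.length_cons] at b
          exact ⟨ha1, by omega, d⟩
        rw [if_neg hP, if_neg hQ]

lemma pvOuterA_shape (add remove : List (Int × Int)) (rows : List (List String)) (s : Int)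
    (g : List (List String)) :
    ((PySem.List.enumerate rows s).foldl
        (fun o rl => (PySem.List.enumerate rl.2).foldl (fun o' cp => pvStepA add remove rl.1 cp.1 o') o) g).map List.length
      = g.map List.length := by
  induction rows generalizing s g with
  | nil => rfl
  | cons x xs ih =>
    rw [PySem.List.enumerate_cons, List.foldl_cons, ih, pvInnerA_shape]

-- ===== VERDICT (by name: the statement is the Claim_ definition above) =====
theorem change_cells_spec : Claim_equal_change_cells := by
  intro input add remove _
  show change_cells input add remove = change_cells_alt input add remove
  have hid : input.map (fun row => row) = input := by simp
  unfold change_cells change_cells_alt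
  rw [hid]
  have hA : ∀ g, (PySem.List.enumerate input).foldl
      (fun output rl => (PySem.List.enumerate rl.2).foldl (fun output cp =>
        if (rl.1, cp.1) ∈ add then output.modify rl.1.toNat (fun line => line.set cp.1.toNat "#")
        else if (rl.1, cp.1) ∈ remove then output.modify rl.1.toNat (fun line => line.set cp.1.toNat "L")
        else output) output) g
      = (PySem.List.enumerate input).foldl
      (fun o rl => (PySem.List.enumerate rl.2).foldl (fun o' cp => pvStepA add remove rl.1 cp.1 o') o) g := by
    intro g; rfl
  rw [hA]
  apply pvGridExt
  · rw [pvOuterA_shape, pvShape_foldB, pvShape_foldB]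
  · intro r c hr hc
    have hshapeA := pvOuterA_shape add remove input 0 input
    have hr0 : r < input.length := by rw [pvLen_of_shape hshapeA] at hr; exact hr
    have hc0 : c < (input.getD r []).length := by rw [pvRowLen_of_shape hshapeA] at hc; exact hc
    rw [pvOuterA_cell add remove input 0 (le_refl 0) input r c hr0 hc0]
    have hshapeR := pvShape_foldB remove "L" input
    have hrR : r < (remove.foldl (fun o rc => pvWriteCell o rc.1 rc.2 "L") input).length := by
      rw [pvLen_of_shape hshapeR]; exact hr0
    have hcR : c < ((remove.foldl (fun o rc => pvWriteCell o rc.1 rc.2 "L") input).getD r []).length := by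
      rw [pvRowLen_of_shape hshapeR]; exact hc0
    rw [pvFoldB_cell add "#" _ r c hrR hcR, pvFoldB_cell remove "L" input r c hr0 hc0]
    have hcond : (0 : Int) ≤ (r : Int) ∧ (r : Int) < 0 + input.length ∧
        (c : Int) < ((input.getD ((r : Int) - 0).toNat []).length : Int) := by
      refine ⟨by omega, by simp; omega, ?_⟩
      have : ((r : Int) - 0).toNat = r := by omega
      rw [this]; exact_mod_cast hc0
    rw [if_pos hcond]
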